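-- pv_equiv track=rewrite | github.com/techno-user314/camvad-auto-editor | src/editor.py | get_cuts_from_frames
-- ===== SOURCE A (Python) =====
-- def get_cuts_from_frames(frames):
--     """
--     Convert a list of camera frames into a list of cuts.
--     """
--     if not frames:
--         return []
--
--     cuts = []
--     start_index = 0
--     current_cam = frames[0]
--
--     for i in range(1, len(frames)):
--         if frames[i] != current_cam:
--             duration = i - start_index
--             #cuts.append((start_index, duration, current_cam))
--             cuts.append(start_index)
--             start_index = i
--             current_cam = frames[i]
--
--     # Add the final cut
--     duration = len(frames) - start_index
--     #cuts.append((start_index, duration, current_cam.value))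
--     cuts.append(start_index)
--     return cuts
-- ===== SOURCE B (Python) =====
-- def _run_lengths(xs):
--     """Split xs into maximal runs of consecutive equal values; return their lengths."""
--     lengths = []
--     i = 0
--     while i < len(xs):
--         k = i + 1
--         while k < len(xs) and xs[k] == xs[i]:
--             k += 1
--         lengths.append(k - i)
--         i = k
--     return lengths
--
--
-- def get_cuts_from_frames(frames):
--     """
--     Convert a list of camera frames into a list of cuts.
--     """
--     cuts = []
--     offset = 0
--     for n in _run_lengths(frames):
--         cuts.append(offset)
--         offset += n
--     return cuts
-- ===== Notes on version B (the rewrite author's own statement) =====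
-- stated objective: alternative
-- what changed: Two staged passes instead of A's single stateful index scan: first a recursive group-by decomposition of the list into maximal runs of equal values (returning the run lengths), then a prefix-sum pass turning the lengths into run start offsets; empty input and the final run need no special cases.
import Mathlib
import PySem

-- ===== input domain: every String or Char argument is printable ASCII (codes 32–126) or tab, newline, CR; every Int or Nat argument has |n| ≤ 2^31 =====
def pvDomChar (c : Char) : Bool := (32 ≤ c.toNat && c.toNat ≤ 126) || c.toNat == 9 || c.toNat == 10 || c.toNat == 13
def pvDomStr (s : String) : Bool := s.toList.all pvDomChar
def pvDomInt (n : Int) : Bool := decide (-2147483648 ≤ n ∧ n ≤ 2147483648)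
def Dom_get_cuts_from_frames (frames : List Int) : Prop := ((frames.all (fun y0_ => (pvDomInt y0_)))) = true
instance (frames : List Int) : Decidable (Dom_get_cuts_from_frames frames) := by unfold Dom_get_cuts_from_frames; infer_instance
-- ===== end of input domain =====

-- B replaces A's single stateful index scan by two staged passes: a recursive group-by
-- split into maximal runs (run lengths), then a prefix-sum pass over the lengths
-- (objective: alternative decomposition, same cost).

-- ===== PORT A =====
-- indices i of the loop are 1 ≤ i < len, so pyGetD's default 0 is never used
def get_cuts_from_frames (frames : List Int) : List Int :=
  if frames = [] then []
  else
    let r := (PySem.List.pyRange 1 (frames.length : Int) 1).foldl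
      (fun (st : List Int × Int × Int) i =>
        if PySem.List.pyGetD frames i 0 ≠ st.2.2 then
          (st.1 ++ [st.2.1], i, PySem.List.pyGetD frames i 0)
        else st)
      (([] : List Int), (0 : Int), PySem.List.pyGetD frames 0 0)
    r.1 ++ [r.2.1]

-- ===== PORT B =====
-- inner while of _run_lengths: advance k while k < len(xs) and xs[k] == xs[i]
def runInner (xs : List Int) (v : Int) (k : Nat) : Nat :=
  if k < xs.length ∧ PySem.List.pyGetD xs (k : Int) 0 = v then runInner xs v (k + 1) else k
termination_by xs.length - k

-- the port's termination needs this: the inner while never moves k backwards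
theorem runInner_ge (xs : List Int) (v : Int) : ∀ (k : Nat), k ≤ runInner xs v k := by
  intro k
  rw [runInner]
  split
  · have := runInner_ge xs v (k + 1); omega
  · exact le_rfl
termination_by k => xs.length - k
decreasing_by rename_i h; omega

-- outer while of _run_lengths over the start index i
def runOuterLoop (xs : List Int) (i : Nat) (lengths : List Int) : List Int :=
  if i < xs.length then
    let k := runInner xs (PySem.List.pyGetD xs (i : Int) 0) (i + 1)
    runOuterLoop xs k (lengths ++ [((k : Int) - (i : Int))])
  else lengths
termination_by xs.length - i
decreasing_by have := runInner_ge xs (PySem.List.pyGetD xs (i : Int) 0) (i + 1); omega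

def get_cuts_from_frames_alt (frames : List Int) : List Int :=
  ((runOuterLoop frames 0 []).foldl
    (fun (st : List Int × Int) n => (st.1 ++ [st.2], st.2 + n))
    (([] : List Int), (0 : Int))).1

-- ===== PRECONDITION & SPEC =====
def Spec_get_cuts_from_frames (frames : List Int) (out : List Int) : Prop := out = get_cuts_from_frames_alt frames
instance (frames : List Int) (out : List Int) : Decidable (Spec_get_cuts_from_frames frames out) := by unfold Spec_get_cuts_from_frames; infer_instance

-- ===== CLAIM (what is proved, stated in full; the proofs are below) =====
def Claim_equal_get_cuts_from_frames : Prop := ∀ (frames : List Int), Dom_get_cuts_from_frames frames → Spec_get_cuts_from_frames frames (get_cuts_from_frames frames)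

-- ===== LEMMAS AND PROOFS =====

-- proof-side recursive forms of B's two while loops
def countRun (v : Int) : List Int → Nat
  | [] => 0
  | y :: r => if y = v then countRun v r + 1 else 0

def runLengthsRec : List Int → List Int
  | [] => []
  | x :: t =>
    let k := countRun x t + 1
    ((k : Nat) : Int) :: runLengthsRec ((x :: t).drop k)
termination_by xs => xs.length
decreasing_by simp [List.length_drop]

-- canonical spec both ports are reduced to: the indices (counted from i) of the
-- elements of the list that differ from their predecessor (prev before the first)
def diffIdx (prev i : Int) : List Int → List Int
  | [] => []
  | y :: r => (if y ≠ prev then [i] else []) ++ diffIdx y (i + 1) r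

-- A's loop body, named for the invariant lemma
def cutStep (frames : List Int) (st : List Int × Int × Int) (i : Int) : List Int × Int × Int :=
  if PySem.List.pyGetD frames i 0 ≠ st.2.2 then
    (st.1 ++ [st.2.1], i, PySem.List.pyGetD frames i 0)
  else st

theorem pyGetD_drop_head (frames : List Int) (j : Nat) (y : Int) (r : List Int)
    (h : frames.drop j = y :: r) : PySem.List.pyGetD frames (j : Int) 0 = y := by
  have h0 : frames[j]? = some y := by
    have h1 : (frames.drop j)[0]? = frames[j + 0]? := List.getElem?_drop
    rw [h] at h1
    simpa using h1.symm
  rw [PySem.List.pyGetD_natCast]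
  simp [List.getD_eq_getElem?_getD, h0]

-- invariant of A's foldl: entering index j with current_cam = frames[j-1], the rest of
-- the loop emits the pending start s followed by the change indices of frames.drop j
theorem cutLoop_inv (frames : List Int) (m : Nat) :
    ∀ (j : Nat) (cuts : List Int) (s c : Int),
      1 ≤ j → j + m = frames.length →
      (((PySem.List.pyRange (j : Int) (frames.length : Int) 1).foldl (cutStep frames) (cuts, s, c)).1
        ++ [((PySem.List.pyRange (j : Int) (frames.length : Int) 1).foldl (cutStep frames) (cuts, s, c)).2.1]) =
      cuts ++ s :: diffIdx c (j : Int) (frames.drop j) := by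
  induction m with
  | zero =>
    intro j cuts s c hj hlen
    rw [PySem.List.pyRange_one_eq_nil (by omega), List.drop_eq_nil_of_le (by omega)]
    simp [diffIdx]
  | succ m ih =>
    intro j cuts s c hj hlen
    obtain ⟨y, r, hdrop⟩ : ∃ y r, frames.drop j = y :: r := by
      cases h : frames.drop j with
      | nil => exfalso; have := congrArg List.length h; simp at this; omega
      | cons y r => exact ⟨y, r, rfl⟩
    have hy : PySem.List.pyGetD frames (j : Int) 0 = y := pyGetD_drop_head frames j y r hdrop
    have hlt : (j : Int) < (frames.length : Int) := by exact_mod_cast (by omega : j < frames.length)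
    rw [PySem.List.pyRange_one_cons hlt]
    simp only [List.foldl_cons]
    have hdrop1 : frames.drop (j + 1) = r := by
      have : frames.drop (j + 1) = (frames.drop j).drop 1 := by rw [List.drop_drop]
      rw [this, hdrop]; rfl
    have ihj : ∀ (cuts : List Int) (s c : Int),
        (((PySem.List.pyRange ((j + 1 : Nat) : Int) (frames.length : Int) 1).foldl (cutStep frames) (cuts, s, c)).1
          ++ [((PySem.List.pyRange ((j + 1 : Nat) : Int) (frames.length : Int) 1).foldl (cutStep frames) (cuts, s, c)).2.1]) =
        cuts ++ s :: diffIdx c ((j + 1 : Nat) : Int) (frames.drop (j + 1)) :=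
      fun cuts s c => ih (j + 1) cuts s c (by omega) (by omega)
    by_cases h : y = c
    · have hstep : cutStep frames (cuts, s, c) (j : Int) = (cuts, s, c) := by
        simp [cutStep, hy, h]
      rw [hstep]
      have := ihj cuts s c
      rw [hdrop1] at this
      rw [show ((j : Int) + 1) = ((j + 1 : Nat) : Int) by push_cast; ring] at *
      rw [this, hdrop]
      simp [diffIdx, h]
    · have hstep : cutStep frames (cuts, s, c) (j : Int)
          = (cuts ++ [s], (j : Int), y) := by
        simp [cutStep, hy, h]
      rw [hstep]
      have := ihj (cuts ++ [s]) (j : Int) y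
      rw [hdrop1] at this
      rw [show ((j : Int) + 1) = ((j + 1 : Nat) : Int) by push_cast; ring] at *
      rw [this, hdrop]
      simp [diffIdx, h]

-- A on a nonempty list is 0 followed by the change indices of the tail
theorem portA_eq_diffIdx (x : Int) (t : List Int) :
    get_cuts_from_frames (x :: t) = 0 :: diffIdx x 1 t := by
  unfold get_cuts_from_frames
  rw [if_neg (by simp)]
  have := cutLoop_inv (x :: t) t.length 1 [] 0 (PySem.List.pyGetD (x :: t) 0 0)
    le_rfl (by rw [List.length_cons]; omega)
  simp only [Nat.cast_one] at this
  change ((PySem.List.pyRange 1 ((x :: t).length : Int) 1).foldl (cutStep (x :: t))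
      ([], 0, PySem.List.pyGetD (x :: t) 0 0)).1
    ++ [((PySem.List.pyRange 1 ((x :: t).length : Int) 1).foldl (cutStep (x :: t))
      ([], 0, PySem.List.pyGetD (x :: t) 0 0)).2.1] = _
  rw [this]
  simp [PySem.List.pyGetD_zero_cons]

-- B-side: the prefix-sum foldl, characterised structurally
def offsets (off : Int) : List Int → List Int
  | [] => []
  | n :: ls => off :: offsets (off + n) ls

theorem foldl_offsets (ls : List Int) : ∀ (acc : List Int) (off : Int),
    (ls.foldl (fun (st : List Int × Int) n => (st.1 ++ [st.2], st.2 + n)) (acc, off)).1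
      = acc ++ offsets off ls := by
  induction ls with
  | nil => intro acc off; simp [offsets]
  | cons n ls ih => intro acc off; simp [offsets, ih]

-- the first element after the equal prefix differs from the run value
theorem countRun_drop_head (x : Int) : ∀ (t : List Int) (y : Int) (r : List Int),
    t.drop (countRun x t) = y :: r → y ≠ x := by
  intro t
  induction t with
  | nil => intro y r h; simp at h
  | cons z t ih =>
    intro y r h
    by_cases hz : z = x
    · rw [show countRun x (z :: t) = countRun x t + 1 by simp [countRun, hz]] at h
      exact ih y r (by simpa using h)
    · rw [show countRun x (z :: t) = 0 by simp [countRun, hz]] at h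
      simp at h
      rw [← h.1]; exact hz

-- diffIdx emits nothing over the equal prefix
theorem diffIdx_skip (x : Int) : ∀ (t : List Int) (i : Int),
    diffIdx x i t = diffIdx x (i + (countRun x t : Int)) (t.drop (countRun x t)) := by
  intro t
  induction t with
  | nil => intro i; simp [countRun]
  | cons z t ih =>
    intro i
    by_cases hz : z = x
    · rw [show countRun x (z :: t) = countRun x t + 1 by simp [countRun, hz]]
      have h1 : diffIdx x i (z :: t) = diffIdx x (i + 1) t := by subst hz; simp [diffIdx]
      rw [h1, ih (i + 1),
        show (z :: t).drop (countRun x t + 1) = t.drop (countRun x t) from by simp,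
        show i + ((countRun x t + 1 : Nat) : Int) = (i + 1) + (countRun x t : Int) from by push_cast; ring]
    · rw [show countRun x (z :: t) = 0 by simp [countRun, hz]]
      simp

-- B's two passes compute 0 followed by the change indices of the tail
theorem offsets_runLengthsRec (n : Nat) : ∀ (t : List Int), t.length ≤ n → ∀ (x off : Int),
    offsets off (runLengthsRec (x :: t)) = off :: diffIdx x (off + 1) t := by
  induction n with
  | zero =>
    intro t ht x off
    have : t = [] := List.eq_nil_of_length_eq_zero (by omega)
    subst this
    rw [show runLengthsRec [x] = [((1 : Nat) : Int)] by simp [runLengthsRec, countRun]]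
    simp [offsets, diffIdx]
  | succ n ih =>
    intro t ht x off
    rw [show runLengthsRec (x :: t)
        = ((countRun x t + 1 : Nat) : Int) :: runLengthsRec ((x :: t).drop (countRun x t + 1)) by
      rw [runLengthsRec]]
    have hdrop : (x :: t).drop (countRun x t + 1) = t.drop (countRun x t) := by simp
    rw [hdrop, offsets, diffIdx_skip x t (off + 1)]
    congr 1
    cases hcase : t.drop (countRun x t) with
    | nil => simp [runLengthsRec, offsets, diffIdx]
    | cons y r =>
      have hy : y ≠ x := countRun_drop_head x t y r hcase
      have hr : r.length ≤ n := by
        have := congrArg List.length hcase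
        simp at this; omega
      rw [ih r hr y (off + ((countRun x t + 1 : Nat) : Int))]
      simp [diffIdx, hy]
      constructor
      · omega
      · congr 1; omega

-- the index-based while loops compute the recursive run-length decomposition
theorem runInner_eq (xs : List Int) (v : Int) : ∀ (k : Nat),
    runInner xs v k = k + countRun v (xs.drop k) := by
  intro k
  rw [runInner]
  by_cases hk : k < xs.length
  · obtain ⟨y, r, hdrop⟩ : ∃ y r, xs.drop k = y :: r := by
      cases h : xs.drop k with
      | nil => exfalso; have := congrArg List.length h; simp at this; omega
      | cons y r => exact ⟨y, r, rfl⟩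
    have hy : PySem.List.pyGetD xs (k : Int) 0 = y := pyGetD_drop_head xs k y r hdrop
    have hdrop1 : xs.drop (k + 1) = r := by
      have h2 : xs.drop (k + 1) = (xs.drop k).drop 1 := by rw [List.drop_drop]
      rw [h2, hdrop]; rfl
    by_cases hv : y = v
    · rw [if_pos ⟨hk, by rw [hy, hv]⟩, runInner_eq xs v (k + 1), hdrop, hdrop1]
      simp [countRun, hv]; omega
    · rw [if_neg (by rw [hy]; tauto), hdrop]
      simp [countRun, hv]
  · rw [if_neg (by tauto), List.drop_eq_nil_of_le (by omega)]
    simp [countRun]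
termination_by k => xs.length - k
decreasing_by omega

theorem runOuterLoop_eq (xs : List Int) (n : Nat) : ∀ (i : Nat) (lengths : List Int),
    xs.length ≤ i + n → runOuterLoop xs i lengths = lengths ++ runLengthsRec (xs.drop i) := by
  induction n with
  | zero =>
    intro i lengths hn
    rw [runOuterLoop, if_neg (by omega), List.drop_eq_nil_of_le (by omega), runLengthsRec]
    simp
  | succ n ih =>
    intro i lengths hn
    rw [runOuterLoop]
    by_cases hi : i < xs.length
    · rw [if_pos hi]
      obtain ⟨y, r, hdrop⟩ : ∃ y r, xs.drop i = y :: r := by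
        cases h : xs.drop i with
        | nil => exfalso; have := congrArg List.length h; simp at this; omega
        | cons y r => exact ⟨y, r, rfl⟩
      have hy : PySem.List.pyGetD xs (i : Int) 0 = y := pyGetD_drop_head xs i y r hdrop
      have hdrop1 : xs.drop (i + 1) = r := by
        have h2 : xs.drop (i + 1) = (xs.drop i).drop 1 := by rw [List.drop_drop]
        rw [h2, hdrop]; rfl
      have hk : runInner xs (PySem.List.pyGetD xs (i : Int) 0) (i + 1)
          = i + 1 + countRun y r := by
        rw [hy, runInner_eq xs y (i + 1), hdrop1]
      simp only [hk]
      rw [ih (i + 1 + countRun y r) _ (by omega)]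
      have hdropk : xs.drop (i + 1 + countRun y r) = (y :: r).drop (countRun y r + 1) := by
        have h2 : xs.drop (i + 1 + countRun y r) = (xs.drop i).drop (1 + countRun y r) := by
          rw [List.drop_drop]; congr 1; omega
        rw [h2, hdrop]; congr 1; omega
      rw [hdropk, hdrop, runLengthsRec]
      simp
      omega
    · rw [if_neg hi, List.drop_eq_nil_of_le (by omega), runLengthsRec]
      simp

-- ===== VERDICT (by name: the statement is the Claim_ definition above) =====
theorem get_cuts_from_frames_spec : Claim_equal_get_cuts_from_frames := by
  intro frames _
  unfold Spec_get_cuts_from_frames get_cuts_from_frames_alt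
  cases frames with
  | nil => simp [get_cuts_from_frames, runOuterLoop]
  | cons x t =>
    rw [portA_eq_diffIdx, runOuterLoop_eq (x :: t) (x :: t).length 0 [] (by omega), List.drop_zero, foldl_offsets]
    simp only [List.nil_append]
    rw [offsets_runLengthsRec t.length t le_rfl x 0]
    simp
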